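-- pv_equiv track=rewrite | github.com/pete-dnae/assay-screening-proj | app/experiment_results/qpcr_results_summary.py | _group_by_pa_assay
-- ===== SOURCE A (Python) =====
-- def _get_item_attribute( key, attribute,contents):
--     if key in contents:
--         item = contents[key]
--     else:
--         item = []
--     attributes = tuple(i[attribute] for i in item)
--     return attributes
--
-- def _group_by_pa_assay(id_qconsts):
--     """
--     Groups constituents by pa assay.
--     :param id_qconsts: a dictionary of wells containing constituents
--     :return:
--     """
--     wells_by_pa_assay = {}
--     for w, wc in id_qconsts.items():
--         pa_assay =_get_item_attribute('transferred_assays',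
--                                            'reagent_name', wc)
--
--         inner = wells_by_pa_assay.setdefault(pa_assay, {})
--         inner[w] = wc
--     return wells_by_pa_assay
-- ===== SOURCE B (Python) =====
-- def _group_by_pa_assay(id_qconsts):
--     keyed = [(tuple(i['reagent_name'] for i in wc.get('transferred_assays', ())), w, wc)
--              for w, wc in id_qconsts.items()]
--     return {key: {w: wc for k, w, wc in keyed if k == key}
--             for key in dict.fromkeys(k for k, _, _ in keyed)}
-- ===== Notes on version B (the rewrite author's own statement) =====
-- stated objective: alternative
-- what changed: B extracts every well's reagent-name key once into a flat list, deduplicates the keys in first-occurrence order with dict.fromkeys, and builds each group by a per-key filter comprehension, instead of A's incremental setdefault bucketing with a helper function.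
import Mathlib
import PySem

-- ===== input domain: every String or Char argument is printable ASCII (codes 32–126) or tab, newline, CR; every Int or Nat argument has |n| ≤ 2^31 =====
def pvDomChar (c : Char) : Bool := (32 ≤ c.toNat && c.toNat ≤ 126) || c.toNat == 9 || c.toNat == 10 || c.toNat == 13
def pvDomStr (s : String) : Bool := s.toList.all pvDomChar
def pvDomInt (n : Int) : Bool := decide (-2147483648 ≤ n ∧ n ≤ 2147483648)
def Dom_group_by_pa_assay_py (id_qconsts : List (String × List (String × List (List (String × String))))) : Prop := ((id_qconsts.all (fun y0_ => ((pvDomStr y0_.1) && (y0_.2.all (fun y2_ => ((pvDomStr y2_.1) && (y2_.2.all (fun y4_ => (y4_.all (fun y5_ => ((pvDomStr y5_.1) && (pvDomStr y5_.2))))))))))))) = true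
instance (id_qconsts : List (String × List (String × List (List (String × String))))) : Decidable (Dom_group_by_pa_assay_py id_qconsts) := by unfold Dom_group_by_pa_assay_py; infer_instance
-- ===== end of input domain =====

-- B replaces A's incremental setdefault bucketing by: extract each well's key once,
-- dedup the keys in first-occurrence order, then build each group by a per-key filter pass
-- (objective: alternative decomposition, same results).

-- dict assignment d[k] = v: overwrite in place, new keys append (shared dict primitive)
def pvDictSet {α β : Type} [BEq α] (d : List (α × β)) (k : α) (v : β) : List (α × β) :=
  if d.any (fun p => p.1 == k) then d.map (fun p => if p.1 == k then (k, v) else p)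
  else d ++ [(k, v)]

-- ===== PORT A =====
-- helper _get_item_attribute; `i[attribute]` ported as lookup with default "" — exact on
-- Pre_ (every item carries the attribute; elsewhere Python raises KeyError)
def get_item_attribute_py (key : String) (attribute_ : String)
    (contents : List (String × List (List (String × String)))) : List String :=
  let item := match List.lookup key contents with
    | some v => v
    | none => []
  item.map (fun i => (List.lookup attribute_ i).getD "")

def group_by_pa_assay_py (id_qconsts : List (String × List (String × List (List (String × String))))) : List (List String × List (String × List (String × List (List (String × String))))) :=
  id_qconsts.foldl (fun acc p =>
    let pa := get_item_attribute_py "transferred_assays" "reagent_name" p.2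
    match List.lookup pa acc with
    | some inner => acc.map (fun q => if q.1 == pa then (pa, pvDictSet inner p.1 p.2) else q)
    | none => acc ++ [(pa, pvDictSet [] p.1 p.2)]) []

-- ===== PORT B =====
-- key extraction inlined in Source B's comprehension; same KeyError domain as A, same "" convention
def pvKeyOf (wc : List (String × List (List (String × String)))) : List String :=
  ((List.lookup "transferred_assays" wc).getD []).map (fun i => (List.lookup "reagent_name" i).getD "")

def group_by_pa_assay_py_alt (id_qconsts : List (String × List (String × List (List (String × String))))) : List (List String × List (String × List (String × List (List (String × String))))) :=
  let keyed := id_qconsts.map (fun p => (pvKeyOf p.2, p.1, p.2))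
  let ks := keyed.foldl (fun ks q => if ks.contains q.1 then ks else ks ++ [q.1]) []  -- dict.fromkeys
  ks.map (fun k => (k, (keyed.filter (fun q => q.1 == k)).foldl (fun inner q => pvDictSet inner q.2.1 q.2.2) []))

-- ===== PRECONDITION & SPEC =====
-- Pre_ excludes exactly the inputs where some transferred_assays item lacks the
-- 'reagent_name' key: there Python A raises KeyError (and so does B).
def Pre_group_by_pa_assay_py (id_qconsts : List (String × List (String × List (List (String × String))))) : Prop :=
  ∀ p ∈ id_qconsts, ∀ i ∈ (List.lookup "transferred_assays" p.2).getD [], (List.lookup "reagent_name" i).isSome = true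
instance (id_qconsts : List (String × List (String × List (List (String × String))))) : Decidable (Pre_group_by_pa_assay_py id_qconsts) := by unfold Pre_group_by_pa_assay_py; infer_instance

def pvWitness_group_by_pa_assay_py : (List (String × List (String × List (List (String × String))))) :=
  [("A1", [("transferred_assays", [[("reagent_name", "x")]])]), ("A2", [])]

def Spec_group_by_pa_assay_py (id_qconsts : List (String × List (String × List (List (String × String))))) (out : List (List String × List (String × List (String × List (List (String × String)))))) : Prop := out = group_by_pa_assay_py_alt id_qconsts
instance (id_qconsts : List (String × List (String × List (List (String × String))))) (out : List (List String × List (String × List (String × List (List (String × String)))))) : Decidable (Spec_group_by_pa_assay_py id_qconsts out) := by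
  unfold Spec_group_by_pa_assay_py
  letI d1 : DecidableEq (List (String × List (List (String × String)))) := inferInstance
  letI d2 : DecidableEq (String × List (String × List (List (String × String)))) := inferInstance
  letI d3 : DecidableEq (List (String × List (String × List (List (String × String))))) := inferInstance
  letI d4 : DecidableEq (List String × List (String × List (String × List (List (String × String))))) := inferInstance
  exact @instDecidableEqList _ d4 out (group_by_pa_assay_py_alt id_qconsts)

-- ===== CLAIM (what is proved, stated in full; the proofs are below) =====
def Claim_equal_group_by_pa_assay_py : Prop := ∀ (id_qconsts : List (String × List (String × List (List (String × String))))), Dom_group_by_pa_assay_py id_qconsts → Pre_group_by_pa_assay_py id_qconsts → Spec_group_by_pa_assay_py id_qconsts (group_by_pa_assay_py id_qconsts)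

-- ===== LEMMAS AND PROOFS =====

abbrev pvEntry := String × List (String × List (List (String × String)))
def pvInner (l : List pvEntry) (k : List String) : List pvEntry :=
  (l.filter (fun p => pvKeyOf p.2 == k)).foldl (fun d p => pvDictSet d p.1 p.2) []
def pvKs (l : List pvEntry) : List (List String) :=
  l.foldl (fun ks p => if ks.contains (pvKeyOf p.2) then ks else ks ++ [pvKeyOf p.2]) []

theorem get_item_eq_keyOf (wc : List (String × List (List (String × String)))) :
    get_item_attribute_py "transferred_assays" "reagent_name" wc = pvKeyOf wc := by
  simp only [get_item_attribute_py, pvKeyOf]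
  cases List.lookup "transferred_assays" wc <;> rfl

theorem alt_eq (l : List pvEntry) :
    group_by_pa_assay_py_alt l = (pvKs l).map (fun k => (k, pvInner l k)) := by
  simp only [group_by_pa_assay_py_alt, pvKs, pvInner, List.foldl_map, List.filter_map]
  rfl

theorem mem_ks_foldl (l : List pvEntry) (acc : List (List String)) (k : List String) :
    k ∈ l.foldl (fun ks p => if ks.contains (pvKeyOf p.2) then ks else ks ++ [pvKeyOf p.2]) acc
      ↔ k ∈ acc ∨ ∃ p ∈ l, pvKeyOf p.2 = k := by
  induction l generalizing acc with
  | nil => simp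
  | cons hd tl ih =>
    simp only [List.foldl_cons, ih, List.mem_cons]
    by_cases h : acc.contains (pvKeyOf hd.2)
    · have h' : pvKeyOf hd.2 ∈ acc := by simpa using h
      simp only [h, if_true]
      constructor
      · rintro (hm | ⟨p, hp, hk⟩)
        · exact Or.inl hm
        · exact Or.inr ⟨p, Or.inr hp, hk⟩
      · rintro (hm | ⟨p, (rfl | hp), hk⟩)
        · exact Or.inl hm
        · exact Or.inl (hk ▸ h')
        · exact Or.inr ⟨p, hp, hk⟩
    · simp only [h, if_false, Bool.false_eq_true]
      constructor
      · rintro (hm | ⟨p, hp, hk⟩)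
        · rcases List.mem_append.mp hm with hm | hm
          · exact Or.inl hm
          · exact Or.inr ⟨hd, Or.inl rfl, (List.mem_singleton.mp hm).symm⟩
        · exact Or.inr ⟨p, Or.inr hp, hk⟩
      · rintro (hm | ⟨p, (rfl | hp), hk⟩)
        · exact Or.inl (List.mem_append_left _ hm)
        · exact Or.inl (List.mem_append_right _ (by simp [hk]))
        · exact Or.inr ⟨p, hp, hk⟩

theorem mem_pvKs (l : List pvEntry) (k : List String) :
    k ∈ pvKs l ↔ ∃ p ∈ l, pvKeyOf p.2 = k := by
  have := mem_ks_foldl l [] k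
  simpa [pvKs] using this

theorem lookup_map_self (ks : List (List String)) (f : List String → List pvEntry) (k : List String) :
    List.lookup k (ks.map (fun k' => (k', f k'))) = if k ∈ ks then some (f k) else none := by
  induction ks with
  | nil => simp
  | cons hd tl ih =>
    by_cases h : hd = k
    · subst h; simp [List.lookup]
    · have hb : (k == hd) = false := beq_eq_false_iff_ne.mpr (Ne.symm h)
      have h' : ¬(k = hd) := fun hh => h hh.symm
      simp [List.lookup, hb, ih, h']

theorem pvKs_append (l : List pvEntry) (p : pvEntry) :
    pvKs (l ++ [p]) = if (pvKs l).contains (pvKeyOf p.2) then pvKs l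
      else pvKs l ++ [pvKeyOf p.2] := by
  simp [pvKs, List.foldl_append]

theorem pvInner_append (l : List pvEntry) (p : pvEntry) (k : List String) :
    pvInner (l ++ [p]) k = if pvKeyOf p.2 = k then pvDictSet (pvInner l k) p.1 p.2
      else pvInner l k := by
  by_cases h : pvKeyOf p.2 = k <;>
    simp [pvInner, List.filter_append, h, List.foldl_append]

theorem pvInner_nil_of_not_mem (l : List pvEntry) (k : List String) (h : k ∉ pvKs l) :
    pvInner l k = [] := by
  have hf : l.filter (fun p => pvKeyOf p.2 == k) = [] := by
    rw [List.filter_eq_nil_iff]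
    intro p hp hk
    exact h ((mem_pvKs l k).mpr ⟨p, hp, by simpa using hk⟩)
  simp [pvInner, hf]

theorem main_eq (l : List pvEntry) :
    group_by_pa_assay_py l = (pvKs l).map (fun k => (k, pvInner l k)) := by
  induction l using List.reverseRecOn with
  | nil => rfl
  | append_singleton l p ih =>
    have hstep : group_by_pa_assay_py (l ++ [p]) =
        (match List.lookup (pvKeyOf p.2) (group_by_pa_assay_py l) with
         | some inner => (group_by_pa_assay_py l).map
             (fun q => if q.1 == pvKeyOf p.2 then (pvKeyOf p.2, pvDictSet inner p.1 p.2) else q)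
         | none => group_by_pa_assay_py l ++ [(pvKeyOf p.2, pvDictSet [] p.1 p.2)]) := by
      conv_lhs => rw [group_by_pa_assay_py]
      conv_rhs => rw [group_by_pa_assay_py]
      rw [List.foldl_concat]
      simp only [get_item_eq_keyOf]
    rw [hstep, ih, lookup_map_self]
    by_cases hmem : pvKeyOf p.2 ∈ pvKs l
    · rw [if_pos hmem]
      have hks : pvKs (l ++ [p]) = pvKs l := by
        rw [pvKs_append]
        simpa using hmem
      show List.map (fun q => if (q.1 == pvKeyOf p.2) = true then (pvKeyOf p.2, pvDictSet (pvInner l (pvKeyOf p.2)) p.1 p.2) else q) (List.map (fun k => (k, pvInner l k)) (pvKs l)) = List.map (fun k => (k, pvInner (l ++ [p]) k)) (pvKs (l ++ [p]))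
      rw [hks, List.map_map]
      apply List.map_congr_left
      intro k hk
      by_cases h : k = pvKeyOf p.2
      · subst h
        simp [Function.comp, pvInner_append]
      · have h2 : pvKeyOf p.2 ≠ k := Ne.symm h
        simp [Function.comp, beq_iff_eq, h, pvInner_append, h2]
    · rw [if_neg hmem]
      show List.map (fun k => (k, pvInner l k)) (pvKs l) ++ [(pvKeyOf p.2, pvDictSet [] p.1 p.2)] = List.map (fun k => (k, pvInner (l ++ [p]) k)) (pvKs (l ++ [p]))
      have hks : pvKs (l ++ [p]) = pvKs l ++ [pvKeyOf p.2] := by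
        rw [pvKs_append]
        simp only [List.contains_eq_mem, decide_eq_true_eq]
        rw [if_neg hmem]
      rw [hks, List.map_append]
      congr 1
      · apply List.map_congr_left
        intro k hk
        have h : pvKeyOf p.2 ≠ k := fun hh => hmem (hh ▸ hk)
        simp [pvInner_append, h]
      · simp [pvInner_append, pvInner_nil_of_not_mem l _ hmem]

-- ===== VERDICT (by name: the statement is the Claim_ definition above) =====
theorem group_by_pa_assay_py_spec : Claim_equal_group_by_pa_assay_py := by
  intro l _ _
  unfold Spec_group_by_pa_assay_py
  rw [main_eq, alt_eq]
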